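-- pv_equiv track=rewrite | github.com/AdamOtto/Daily-Challenges | Challenge837.py | Rule4CheckerHelper
-- ===== SOURCE A (Python) =====
-- def Rule4CheckerHelper(ar):
--     if len(ar) == 0:
--         return False
--     retVal = True
--     for letter in ar:
--         if ord("a") > ord(letter) or ord(letter) > ord("z"):
--             retVal = False
--     return retVal
-- ===== SOURCE B (Python) =====
-- def Rule4CheckerHelper(ar):
--     if len(ar) == 0:
--         return False
--     lo = min(ar)
--     hi = max(ar)
--     return ord("a") <= ord(lo) and ord(hi) <= ord("z")
-- ===== Notes on version B (the rewrite author's own statement) =====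
-- stated objective: simpler
-- what changed: B replaces the per-element range check by computing min(ar) and max(ar) once and testing only the two extremal characters against 'a' and 'z'.
import Mathlib
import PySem

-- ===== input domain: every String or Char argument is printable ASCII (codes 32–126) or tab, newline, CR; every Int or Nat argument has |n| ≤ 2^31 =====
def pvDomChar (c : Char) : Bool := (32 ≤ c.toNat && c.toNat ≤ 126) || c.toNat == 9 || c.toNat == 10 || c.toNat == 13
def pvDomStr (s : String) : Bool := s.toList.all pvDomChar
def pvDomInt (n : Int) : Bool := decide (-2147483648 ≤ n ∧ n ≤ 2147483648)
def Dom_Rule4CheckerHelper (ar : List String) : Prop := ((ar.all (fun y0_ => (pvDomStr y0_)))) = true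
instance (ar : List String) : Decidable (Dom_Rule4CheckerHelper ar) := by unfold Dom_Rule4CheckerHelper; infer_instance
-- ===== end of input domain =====

-- B replaces A's per-element scan by a min/max computation: only the two extremal elements are range-checked ('simpler').


-- ===== PORT A =====
-- ord(s) for a single-character string (Pre_ guarantees length 1, where this is exact)
def pyOrd (s : String) : Nat := (s.toList.headD 'a').toNat

def Rule4CheckerHelper (ar : List String) : Bool :=
  if ar.length == 0 then false
  else ar.foldl (fun retVal letter =>
    if 97 > pyOrd letter || pyOrd letter > 122 then false else retVal) true

-- ===== PORT B =====
def Rule4CheckerHelper_alt (ar : List String) : Bool :=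
  if ar.length == 0 then false
  else
    match PySem.List.min? ar (fun x => x), PySem.List.max? ar (fun x => x) with
    | some lo, some hi => decide (97 ≤ pyOrd lo) && decide (pyOrd hi ≤ 122)
    | _, _ => false

-- ===== PRECONDITION & SPEC =====
-- Pre_ excludes elements that are not single-character strings: ord() raises TypeError on them in A (and in B).
def Pre_Rule4CheckerHelper (ar : List String) : Prop := ∀ s ∈ ar, s.toList.length = 1
instance (ar : List String) : Decidable (Pre_Rule4CheckerHelper ar) := by unfold Pre_Rule4CheckerHelper; infer_instance
def pvWitness_Rule4CheckerHelper : List String := ["a", "b", "!"]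

def Spec_Rule4CheckerHelper (ar : List String) (out : Bool) : Prop := out = Rule4CheckerHelper_alt ar
instance (ar : List String) (out : Bool) : Decidable (Spec_Rule4CheckerHelper ar out) := by unfold Spec_Rule4CheckerHelper; infer_instance

-- ===== CLAIM (what is proved, stated in full; the proofs are below) =====
def Claim_equal_Rule4CheckerHelper : Prop := ∀ (ar : List String), Dom_Rule4CheckerHelper ar → Pre_Rule4CheckerHelper ar → Spec_Rule4CheckerHelper ar (Rule4CheckerHelper ar)

-- ===== LEMMAS AND PROOFS =====

-- A's loop is 'all elements in range', whatever the accumulator starts as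
theorem foldlA_eq_all (ar : List String) (b : Bool) :
    ar.foldl (fun retVal letter =>
      if 97 > pyOrd letter || pyOrd letter > 122 then false else retVal) b
    = (b && ar.all (fun s => decide (97 ≤ pyOrd s) && decide (pyOrd s ≤ 122))) := by
  induction ar generalizing b with
  | nil => simp
  | cons x t ih =>
    simp only [List.foldl_cons, List.all_cons, ih]
    by_cases h1 : 97 ≤ pyOrd x <;> by_cases h2 : pyOrd x ≤ 122 <;>
      simp [h1, h2, Nat.lt_of_not_le, Nat.not_lt_of_le, Bool.and_comm]

-- lexicographic order on single-character strings is the order of the character codes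
theorem ord_le_of_le {s t : String} (hs : s.toList.length = 1) (ht : t.toList.length = 1)
    (h : s ≤ t) : pyOrd s ≤ pyOrd t := by
  obtain ⟨a, ha⟩ : ∃ a, s.toList = [a] := List.length_eq_one_iff.mp hs
  obtain ⟨b, hb⟩ : ∃ b, t.toList = [b] := List.length_eq_one_iff.mp ht
  by_contra hab
  have hba : b < a := by
    have := Nat.lt_of_not_le hab
    simp only [pyOrd, ha, hb, List.headD] at this
    exact Char.lt_def.mpr (by exact_mod_cast this)
  have : t < s := by
    rw [String.lt_iff_toList_lt, ha, hb]
    exact List.Lex.rel hba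
  exact absurd h (not_le.mpr this)

theorem Rule4CheckerHelper_spec : Claim_equal_Rule4CheckerHelper := by
  intro ar _ hpre
  unfold Spec_Rule4CheckerHelper Rule4CheckerHelper Rule4CheckerHelper_alt
  cases ar with
  | nil => simp
  | cons x t =>
    rw [if_neg (by simp), if_neg (by simp)]
    obtain ⟨lo, hlo⟩ : ∃ lo, PySem.List.min? (x :: t) (fun x => x) = some lo := by
      cases h : PySem.List.min? (x :: t) (fun x => x) with
      | none => exact absurd ((PySem.List.min?_eq_none_iff _ _).mp h) (List.cons_ne_nil x t)
      | some lo => exact ⟨lo, rfl⟩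
    obtain ⟨hi, hhi⟩ : ∃ hi, PySem.List.max? (x :: t) (fun x => x) = some hi := by
      cases h : PySem.List.max? (x :: t) (fun x => x) with
      | none => exact absurd ((PySem.List.max?_eq_none_iff _ _).mp h) (List.cons_ne_nil x t)
      | some hi => exact ⟨hi, rfl⟩
    rw [hlo, hhi, foldlA_eq_all]
    have hlomem := PySem.List.min?_mem hlo
    have hhimem := PySem.List.max?_mem hhi
    have hlomin := PySem.List.min?_isMin hlo
    have hhimax := PySem.List.max?_isMax hhi
    simp only [Bool.true_and]
    by_cases hall : ∀ s ∈ x :: t, 97 ≤ pyOrd s ∧ pyOrd s ≤ 122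
    · have h1 : 97 ≤ pyOrd lo := (hall lo hlomem).1
      have h2 : pyOrd hi ≤ 122 := (hall hi hhimem).2
      simp only [h1, h2, decide_true, Bool.and_self]
      rw [List.all_eq_true]
      intro s hs
      simp [(hall s hs).1, (hall s hs).2]
    · push_neg at hall
      obtain ⟨s, hs, hbad⟩ := hall
      have hne : ¬ (97 ≤ pyOrd s ∧ pyOrd s ≤ 122) := by
        intro ⟨h1, h2⟩; exact absurd (hbad h1) (not_lt.mpr h2)
      have lhs : ((x :: t).all (fun s => decide (97 ≤ pyOrd s) && decide (pyOrd s ≤ 122))) = false := by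
        rw [Bool.eq_false_iff]
        intro hcontra
        rw [List.all_eq_true] at hcontra
        have := hcontra s hs
        simp at this
        exact hne this
      rw [lhs]
      by_cases h1 : 97 ≤ pyOrd lo
      · by_cases h2 : pyOrd hi ≤ 122
        · exfalso
          apply hne
          constructor
          · exact le_trans h1 (ord_le_of_le (hpre lo hlomem) (hpre s hs) (hlomin s hs))
          · exact le_trans (ord_le_of_le (hpre s hs) (hpre hi hhimem) (hhimax s hs)) h2
        · simp [h2]
      · simp [h1]
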